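-- pv_equiv track=rewrite | github.com/cfpaperdragon/advent-of-code-2021 | code/day12.py | can_repeat_small_cave
-- ===== SOURCE A (Python) =====
-- def can_repeat_small_cave(path):
--     lowercase_nodes = {}
--     for node in path:
--         if node.islower():
--             if node in lowercase_nodes.keys():
--                 return False
--             else:
--                 lowercase_nodes[node] = 1
--                 continue
--     return True
-- ===== SOURCE B (Python) =====
-- def can_repeat_small_cave(path):
--     lows = [n for n in path if n.islower()]
--     return len(lows) == len(set(lows))
-- ===== Notes on version B (the rewrite author's own statement) =====
-- stated objective: simpler
-- what changed: Replaces the incremental seen-dict scan with early return by a collect-then-compare pass: gather the lowercase nodes and compare the list's length with its set's size.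
import Mathlib
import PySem

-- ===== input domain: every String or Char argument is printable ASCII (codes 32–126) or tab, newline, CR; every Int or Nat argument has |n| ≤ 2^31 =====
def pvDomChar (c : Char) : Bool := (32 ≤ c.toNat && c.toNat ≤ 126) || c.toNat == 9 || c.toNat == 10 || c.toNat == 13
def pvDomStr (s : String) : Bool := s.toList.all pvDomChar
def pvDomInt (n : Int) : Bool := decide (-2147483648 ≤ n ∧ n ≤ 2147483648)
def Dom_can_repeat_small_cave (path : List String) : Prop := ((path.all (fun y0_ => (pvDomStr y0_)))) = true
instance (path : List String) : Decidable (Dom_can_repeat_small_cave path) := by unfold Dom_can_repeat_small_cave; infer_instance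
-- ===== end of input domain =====

-- B replaces A's incremental seen-dict scan (early return on a repeat) by a
-- collect-then-compare pass: gather the lowercase nodes, compare list length with set size. Objective: simpler.

-- Python str.islower(): at least one cased character and no uppercase one; exact on the ASCII
-- domain via PySem's char-level islower/isupper (hand-ported: PySem has no string-level islower).
def pyStrIslower (s : String) : Bool :=
  s.toList.any (fun c => PySem.Str.islower c || PySem.Str.isupper c)
    && s.toList.all (fun c => !PySem.Str.isupper c)

-- ===== PORT A =====
-- loop of A: walk the path keeping the dict of lowercase nodes seen, return False on a repeat
def canRepeatGo : List String → PySem.Dict String Int → Bool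
  | [], _ => true
  | node :: rest, d =>
    if pyStrIslower node then
      if d.contains node then false
      else canRepeatGo rest (d.insert node 1)
    else canRepeatGo rest d

def can_repeat_small_cave (path : List String) : Bool :=
  canRepeatGo path PySem.Dict.empty

-- ===== PORT B =====
def can_repeat_small_cave_alt (path : List String) : Bool :=
  let lows := path.filter (fun n => pyStrIslower n)
  lows.length == (PySem.Set.ofList lows).length

-- ===== PRECONDITION & SPEC =====
def Spec_can_repeat_small_cave (path : List String) (out : Bool) : Prop := out = can_repeat_small_cave_alt path
instance (path : List String) (out : Bool) : Decidable (Spec_can_repeat_small_cave path out) := by unfold Spec_can_repeat_small_cave; infer_instance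

-- ===== CLAIM (what is proved, stated in full; the proofs are below) =====
def Claim_equal_can_repeat_small_cave : Prop := ∀ (path : List String), Dom_can_repeat_small_cave path → Spec_can_repeat_small_cave path (can_repeat_small_cave path)

-- ===== LEMMAS AND PROOFS =====

-- folding Set.add: the length grows by at most one per element …
theorem foldl_add_length_le (l : List String) (s : PySem.Set String) :
    (l.foldl PySem.Set.add s).length ≤ s.length + l.length := by
  induction l generalizing s with
  | nil => simp
  | cons x l ih =>
    simp only [List.foldl_cons, PySem.Set.add, List.length_cons]
    split
    · exact le_trans (ih s) (by omega)
    · have := ih (s ++ [x]); simp only [List.length_append, List.length_singleton] at this; omega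

-- … and reaches s.length + l.length exactly when l is nodup and disjoint from s
theorem foldl_add_length_eq_iff (l : List String) (s : PySem.Set String) :
    (l.foldl PySem.Set.add s).length = s.length + l.length ↔ (l.Nodup ∧ ∀ x ∈ l, x ∉ s) := by
  induction l generalizing s with
  | nil => simp
  | cons x l ih =>
    simp only [List.foldl_cons, PySem.Set.add, List.length_cons]
    by_cases hx : PySem.Set.contains s x
    · have hmem : x ∈ s := by simpa [PySem.Set.contains] using hx
      simp only [hx, if_pos]
      have hle := foldl_add_length_le l s
      constructor
      · intro h; omega
      · rintro ⟨-, hall⟩; exact absurd hmem (hall x (by simp))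
    · have hmem : x ∉ s := by simpa [PySem.Set.contains] using hx
      simp only [hx, Bool.false_eq_true, if_neg, not_false_iff]
      have hlen : s.length + (l.length + 1) = (s ++ [x]).length + l.length := by
        simp; omega
      rw [hlen, ih (s ++ [x]), List.nodup_cons]
      constructor
      · rintro ⟨hnd, hall⟩
        refine ⟨⟨fun hxl => ?_, hnd⟩, ?_⟩
        · exact absurd (hall x hxl) (by simp)
        · intro y hy hys
          rcases List.mem_cons.mp hy with h | h
          · exact hmem (h ▸ hys)
          · exact (hall y h) (by simp [hys])
      · rintro ⟨⟨hxl, hnd⟩, hall⟩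
        refine ⟨hnd, fun y hy => ?_⟩
        simp only [List.mem_append, List.mem_singleton, not_or]
        exact ⟨hall y (List.mem_cons_of_mem x hy), fun he => hxl (he ▸ hy)⟩

theorem ofList_length_eq_iff (l : List String) :
    ((PySem.Set.ofList l).length = l.length) ↔ l.Nodup := by
  rw [PySem.Set.ofList_eq_foldl]
  have h := foldl_add_length_eq_iff l []
  simp only [List.length_nil, Nat.zero_add, List.not_mem_nil, not_false_iff, implies_true,
    and_true] at h
  exact h

-- characterise B: true iff the lowercase nodes are pairwise distinct
theorem alt_eq_nodup (path : List String) :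
    can_repeat_small_cave_alt path
      = decide (path.filter (fun n => pyStrIslower n)).Nodup := by
  unfold can_repeat_small_cave_alt
  set lows := path.filter (fun n => pyStrIslower n) with hl
  have h := ofList_length_eq_iff lows
  by_cases hnd : lows.Nodup
  · simp [h.mpr hnd, hnd]
  · have : (PySem.Set.ofList lows).length ≠ lows.length := fun he => hnd (h.mp he)
    simp only [hnd, decide_false, beq_eq_false_iff_ne, ne_eq]
    omega

-- characterise A's loop: true iff the remaining lowercase nodes are fresh and mutually distinct
theorem go_eq (l : List String) (d : PySem.Dict String Int) :
    canRepeatGo l d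
      = decide ((l.filter (fun n => pyStrIslower n)).Nodup ∧
                 ∀ x ∈ l.filter (fun n => pyStrIslower n), ¬ (d.contains x = true)) := by
  induction l generalizing d with
  | nil => simp [canRepeatGo]
  | cons n rest ih =>
    by_cases hlow : pyStrIslower n
    · by_cases hc : d.contains n
      · simp [canRepeatGo, hlow, hc]
      · rw [show canRepeatGo (n :: rest) d = canRepeatGo rest (d.insert n 1) by
          simp [canRepeatGo, hlow, hc]]
        rw [ih]
        simp only [List.filter_cons, hlow, if_pos, List.nodup_cons, List.mem_cons,
          decide_eq_decide]
        constructor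
        · rintro ⟨hnd, hall⟩
          refine ⟨⟨fun hmem => ?_, hnd⟩, ?_⟩
          · have := hall n hmem
            rw [PySem.Dict.contains_insert] at this
            simp at this
          · rintro x (rfl | hx)
            · exact fun h => hc h
            · have := hall x hx
              rw [PySem.Dict.contains_insert] at this
              simp only [Bool.or_eq_true, beq_iff_eq, not_or] at this
              exact this.2
        · rintro ⟨⟨hnmem, hnd⟩, hall⟩
          refine ⟨hnd, fun x hx => ?_⟩
          rw [PySem.Dict.contains_insert]
          simp only [Bool.or_eq_true, beq_iff_eq, not_or]
          exact ⟨fun he => hnmem (he ▸ hx), hall x (Or.inr hx)⟩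
    · rw [show canRepeatGo (n :: rest) d = canRepeatGo rest d by
        simp [canRepeatGo, hlow]]
      rw [ih]
      simp [hlow]

-- ===== VERDICT (by name: the statement is the Claim_ definition above) =====
theorem can_repeat_small_cave_spec : Claim_equal_can_repeat_small_cave := by
  intro path _
  unfold Spec_can_repeat_small_cave can_repeat_small_cave
  rw [go_eq, alt_eq_nodup]
  simp [PySem.Dict.empty, PySem.Dict.contains]
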